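-- pv_equiv track=rewrite | github.com/riwogerald/calc2 | calc.py | divide_strings
-- ===== SOURCE A (Python) =====
-- def compare_strings(num1, num2):
--     # Compare magnitudes of num1 and num2
--     if len(num1) > len(num2):
--         return 1
--     elif len(num1) < len(num2):
--         return -1
--     else:
--         if num1 == num2:
--             return 0
--         elif num1 > num2:
--             return 1
--         else:
--             return -1
--
-- def subtract_strings(num1, num2):
--     # num1 and num2 are strings of digits, num1 >= num2
--     # Returns string of digits
--     maxlen = max(len(num1), len(num2))
--     num1 = num1.zfill(maxlen)
--     num2 = num2.zfill(maxlen)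
--     borrow = 0
--     result = []
--     for i in range(maxlen - 1, -1, -1):
--         n1 = int(num1[i])
--         n2 = int(num2[i]) + borrow
--         if n1 < n2:
--             n1 += 10
--             borrow = 1
--         else:
--             borrow = 0
--         diff = n1 - n2
--         result.append(str(diff))
--     result_str = ''.join(result[::-1]).lstrip('0')
--     if result_str == '':
--         result_str = '0'
--     return result_str
--
-- def divide_strings(num1, num2, decimal_places=0):
--     # num1 and num2 are strings, num2 != '0'
--     # Returns quotient, remainder
--     if num2 == '0':
--         raise ZeroDivisionError('Division by zero')
--     if num1 == '0':
--         return ('0', '0')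
--     cmp = compare_strings(num1, num2)
--     if cmp < 0:
--         return ('0', num1)  # Quotient is 0, remainder is num1
--     elif cmp == 0:
--         return ('1', '0')  # Quotient is 1, remainder is 0
--     else:
--         # num1 > num2
--         quotient = ''
--         remainder = ''
--         n = len(num1)
--         i = 0
--         while i < n or (decimal_places > 0 and remainder != '0'):
--             if i < n:
--                 remainder += num1[i]
--                 i += 1
--             else:
--                 remainder += '0'
--                 decimal_places -= 1
--             remainder = remainder.lstrip('0')
--             if remainder == '':
--                 remainder = '0'
--             count = 0
--             while compare_strings(remainder, num2) >= 0:
--                 remainder = subtract_strings(remainder, num2)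
--                 count += 1
--             quotient += str(count)
--         quotient = quotient.lstrip('0')
--         if quotient == '':
--             quotient = '0'
--         remainder = remainder.lstrip('0')
--         if remainder == '':
--             remainder = '0'
--         return (quotient, remainder)
-- ===== SOURCE B (Python) =====
-- def compare_strings(num1, num2):
--     # Compare magnitudes of num1 and num2
--     if len(num1) > len(num2):
--         return 1
--     elif len(num1) < len(num2):
--         return -1
--     else:
--         if num1 == num2:
--             return 0
--         elif num1 > num2:
--             return 1
--         else:
--             return -1
--
-- def _to_int(s):
--     # one Horner pass over the digit string
--     v = 0
--     for ch in s:
--         v = 10 * v + (ord(ch) - 48)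
--     return v
--
-- def divide_strings(num1, num2, decimal_places=0):
--     # Same early branches as A (they are the spec for the non-numeric corners);
--     # the long-division body is replaced by one machine divmod plus a short
--     # fractional-digit loop.
--     if num2 == '0':
--         raise ZeroDivisionError('Division by zero')
--     if num1 == '0':
--         return ('0', '0')
--     cmp = compare_strings(num1, num2)
--     if cmp < 0:
--         return ('0', num1)
--     elif cmp == 0:
--         return ('1', '0')
--     else:
--         a, b = _to_int(num1), _to_int(num2)
--         q, r = divmod(a, b)
--         digits = []
--         while decimal_places > 0 and r != 0:
--             r *= 10
--             d, r = divmod(r, b)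
--             digits.append(str(d))
--             decimal_places -= 1
--         quotient = (str(q) + ''.join(digits)).lstrip('0') or '0'
--         return (quotient, str(r))
-- ===== Notes on version B (the rewrite author's own statement) =====
-- stated objective: faster
-- what changed: A runs a digit-by-digit string long division whose inner loop repeatedly subtracts the divisor string (building, zero-filling and re-stripping strings per column); B parses both operands once with a Horner pass, gets quotient and remainder from one machine divmod, and produces the fractional digits with a small r=10*r; divmod(r,b) loop, keeping A's compare_strings early branches for the sub-divisor and non-numeric corners.
-- outside the precondition, e.g. on divide_strings('100', '007', 0): A returns ('1', '93'), B returns ('14', '2'); on divide_strings('0:', '!!', 0): A returns ('0', ':'), B returns ('-1', '-155')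
import Mathlib
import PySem

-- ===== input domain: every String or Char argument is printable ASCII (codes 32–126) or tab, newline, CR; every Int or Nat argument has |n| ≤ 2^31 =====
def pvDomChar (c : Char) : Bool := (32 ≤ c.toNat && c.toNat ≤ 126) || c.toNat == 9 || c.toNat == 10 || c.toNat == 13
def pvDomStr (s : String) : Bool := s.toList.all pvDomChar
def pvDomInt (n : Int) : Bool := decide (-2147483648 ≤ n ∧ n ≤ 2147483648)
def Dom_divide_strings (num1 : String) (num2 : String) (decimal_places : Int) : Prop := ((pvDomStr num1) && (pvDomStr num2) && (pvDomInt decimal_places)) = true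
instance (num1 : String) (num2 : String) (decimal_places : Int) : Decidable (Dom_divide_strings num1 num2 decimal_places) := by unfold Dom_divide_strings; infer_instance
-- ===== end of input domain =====

-- B replaces A's string long division (repeated string subtraction per output digit) by one machine
-- divmod after a single Horner parse, plus a short fractional-digit loop; the early branches (the
-- spec for the non-numeric corners) are shared.

-- ===== PORT A =====

-- s.lstrip('0')  (exact: drops the leading '0' characters, nothing else)
def pvLstrip0 (s : List Char) : List Char := s.dropWhile (· == '0')

-- compare_strings, shared helper of both sources (on .toList; Python's str '>' is code-point lex '<' flipped)
def pvCmp (a b : List Char) : Int :=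
  if a.length > b.length then 1
  else if a.length < b.length then -1
  else if a = b then 0
  else if b < a then 1
  else -1

-- int(c) for the one-character string c  (Python raises ValueError off digits; excluded by Pre_)
def pvCharInt (c : Char) : Int := (PySem.Int.ofChars? [c]).getD 0

-- the `for i in range(maxlen - 1, -1, -1)` body of subtract_strings, index counting down
def pvSubLoop (a b : List Char) : Nat → Int → List (List Char) → Int × List (List Char)
  | 0, borrow, result => (borrow, result)
  | k + 1, borrow, result =>
    let n1 := pvCharInt ((PySem.List.pyGet? a (k : Int)).getD ' ')
    let n2 := pvCharInt ((PySem.List.pyGet? b (k : Int)).getD ' ') + borrow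
    let p := if n1 < n2 then (n1 + 10, (1 : Int)) else (n1, 0)
    let diff := p.1 - n2
    pvSubLoop a b k p.2 (result ++ [PySem.Int.toChars diff])

def pvSubtract (num1 num2 : List Char) : List Char :=
  let maxlen := max num1.length num2.length
  let a := PySem.Chars.zfill num1 (maxlen : Int)
  let b := PySem.Chars.zfill num2 (maxlen : Int)
  let res := (pvSubLoop a b maxlen 0 []).2
  let rs := pvLstrip0 res.reverse.flatten
  if rs = [] then ['0'] else rs

-- the inner `while compare_strings(remainder, num2) >= 0` loop (fuel 10: the count is a single digit
-- inside Pre_, proved by the loop invariant below; outside Pre_ nothing is claimed)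
def pvCountLoop (num2 : List Char) : Nat → List Char → Int → List Char × Int
  | 0, rem, count => (rem, count)
  | f + 1, rem, count =>
    if pvCmp rem num2 ≥ 0 then pvCountLoop num2 f (pvSubtract rem num2) (count + 1)
    else (rem, count)

-- the outer `while i < n or (decimal_places > 0 and remainder != '0')` loop (fuel: each pass either
-- advances i toward n or decrements decimal_places, so the entry fuel below is never exhausted)
def pvDivLoop (num1 num2 : List Char) (n : Nat) : Nat → Nat → Int → List Char → List Char → List Char × List Char
  | 0, _, _, rem, quot => (quot, rem)
  | f + 1, i, dp, rem, quot =>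
    if i < n ∨ (dp > 0 ∧ rem ≠ ['0']) then
      let s := if i < n then (rem ++ [(PySem.List.pyGet? num1 (i : Int)).getD ' '], i + 1, dp)
               else (rem ++ ['0'], i, dp - 1)
      let rem1 := pvLstrip0 s.1
      let rem2 := if rem1 = [] then ['0'] else rem1
      let rc := pvCountLoop num2 10 rem2 0
      pvDivLoop num1 num2 n f s.2.1 s.2.2 rc.1 (quot ++ PySem.Int.toChars rc.2)
    else (quot, rem)

def divide_strings (num1 : String) (num2 : String) (decimal_places : Int) : String × String :=
  if num2 = "0" then ("", "")          -- Python: raise ZeroDivisionError (excluded by Pre_)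
  else if num1 = "0" then ("0", "0")
  else
    let cmp := pvCmp num1.toList num2.toList
    if cmp < 0 then ("0", num1)
    else if cmp = 0 then ("1", "0")
    else
      let n := num1.toList.length
      let fuel := n + (if decimal_places > 0 then decimal_places.toNat else 0) + 1
      let qr := pvDivLoop num1.toList num2.toList n fuel 0 decimal_places [] []
      let q1 := pvLstrip0 qr.1
      let q2 := if q1 = [] then ['0'] else q1
      let r1 := pvLstrip0 qr.2
      let r2 := if r1 = [] then ['0'] else r1
      (String.ofList q2, String.ofList r2)

-- ===== PORT B =====

-- B's _to_int: one Horner pass, v = 10*v + (ord(ch) - 48)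
def pvToInt (s : List Char) : Int := s.foldl (fun v c => 10 * v + ((c.toNat : Int) - 48)) 0

-- B's fractional-digit loop; fuel = max(decimal_places, 0), exactly the maximal number of passes
def pvFracLoop (b : Int) : Nat → Int → Int → List (List Char) → List (List Char) × Int
  | 0, _, r, ds => (ds, r)
  | f + 1, dp, r, ds =>
    if dp > 0 ∧ r ≠ 0 then
      let r10 := r * 10
      let d := PySem.Int.floordiv r10 b
      pvFracLoop b f (dp - 1) (PySem.Int.mod r10 b) (ds ++ [PySem.Int.toChars d])
    else (ds, r)

def divide_strings_alt (num1 : String) (num2 : String) (decimal_places : Int) : String × String :=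
  if num2 = "0" then ("", "")          -- Python: raise ZeroDivisionError (excluded by Pre_)
  else if num1 = "0" then ("0", "0")
  else
    let cmp := pvCmp num1.toList num2.toList
    if cmp < 0 then ("0", num1)
    else if cmp = 0 then ("1", "0")
    else
      let a := pvToInt num1.toList
      let b := pvToInt num2.toList
      let q := PySem.Int.floordiv a b
      let r := PySem.Int.mod a b
      let dr := pvFracLoop b (if decimal_places > 0 then decimal_places.toNat else 0) decimal_places r []
      let qs := pvLstrip0 (PySem.Int.toChars q ++ dr.1.flatten)
      let qs2 := if qs = [] then ['0'] else qs
      (String.ofList qs2, PySem.Int.toStr dr.2)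

-- ===== PRECONDITION & SPEC =====
-- Pre_ excludes: (a) num2 = "0" (A raises ZeroDivisionError); (b) long-division inputs
-- (compare_strings > 0) whose operands are not plain digit strings or whose divisor carries a
-- leading zero — there A raises ValueError in subtract_strings or, on the leading-zero-divisor
-- corner, its length-based comparison stops subtracting early and returns an accidental partial
-- quotient that no caller would specify. All inputs the early branches return on are admitted.
def Pre_divide_strings (num1 : String) (num2 : String) (decimal_places : Int) : Prop :=
  num2 ≠ "0" ∧
  (num1 = "0" ∨
   num1.toList.length < num2.toList.length ∨
   (num1.toList.length = num2.toList.length ∧ PySem.Chars.strLt num2.toList num1.toList = false) ∨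
   (num1.toList ≠ [] ∧ num2.toList ≠ [] ∧
    num1.toList.all (fun c => decide ('0' ≤ c) && decide (c ≤ '9')) = true ∧
    num2.toList.all (fun c => decide ('0' ≤ c) && decide (c ≤ '9')) = true ∧
    num2.toList.head? ≠ some '0'))
instance (num1 : String) (num2 : String) (decimal_places : Int) : Decidable (Pre_divide_strings num1 num2 decimal_places) := by
  unfold Pre_divide_strings; infer_instance

def pvWitness_divide_strings : String × String × Int := ("1005", "7", 3)

def Spec_divide_strings (num1 : String) (num2 : String) (decimal_places : Int) (out : String × String) : Prop := out = divide_strings_alt num1 num2 decimal_places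
instance (num1 : String) (num2 : String) (decimal_places : Int) (out : String × String) : Decidable (Spec_divide_strings num1 num2 decimal_places out) := by unfold Spec_divide_strings; infer_instance

-- ===== CLAIM (what is proved, stated in full; the proofs are below) =====
def Claim_equal_divide_strings : Prop := ∀ (num1 : String) (num2 : String) (decimal_places : Int), Dom_divide_strings num1 num2 decimal_places → Pre_divide_strings num1 num2 decimal_places → Spec_divide_strings num1 num2 decimal_places (divide_strings num1 num2 decimal_places)

-- ===== LEMMAS AND PROOFS =====

/- ## Spec-level abstractions: digit values and canonical decimal representations -/

def pvVal (cs : List Char) : Nat := cs.foldl (fun a c => 10 * a + (c.toNat - 48)) 0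

def pvDig (cs : List Char) : Prop := ∀ c ∈ cs, '0' ≤ c ∧ c ≤ '9'

def pvNatRepr (n : Nat) : List Char := ((Nat.digits 10 n).map Nat.digitChar).reverse

def pvCanon (n : Nat) : List Char := if n = 0 then ['0'] else pvNatRepr n

/- ## Character-level facts -/

theorem pvCharEq (c d : Char) (h : c.toNat = d.toNat) : c = d := by
  apply Char.ext; exact UInt32.toNat_inj.mp h

theorem pvCharToNatLe (c d : Char) (h : c ≤ d) : c.toNat ≤ d.toNat := by
  rw [Char.le_def, UInt32.le_iff_toNat_le] at h; exact h

theorem pvDigit_cases (c : Char) (h : '0' ≤ c ∧ c ≤ '9') :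
    c = '0' ∨ c = '1' ∨ c = '2' ∨ c = '3' ∨ c = '4' ∨ c = '5' ∨ c = '6' ∨ c = '7' ∨ c = '8' ∨ c = '9' := by
  have h0 := pvCharToNatLe _ _ h.1
  have h9 := pvCharToNatLe _ _ h.2
  have e0 : ('0' : Char).toNat = 48 := by decide
  have e9 : ('9' : Char).toNat = 57 := by decide
  rw [e0] at h0; rw [e9] at h9
  have hx : c.toNat = 48 ∨ c.toNat = 49 ∨ c.toNat = 50 ∨ c.toNat = 51 ∨ c.toNat = 52 ∨ c.toNat = 53
      ∨ c.toNat = 54 ∨ c.toNat = 55 ∨ c.toNat = 56 ∨ c.toNat = 57 := by omega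
  rcases hx with h|h|h|h|h|h|h|h|h|h
  · simp [pvCharEq c '0' (by rw [h]; decide)]
  · simp [pvCharEq c '1' (by rw [h]; decide)]
  · simp [pvCharEq c '2' (by rw [h]; decide)]
  · simp [pvCharEq c '3' (by rw [h]; decide)]
  · simp [pvCharEq c '4' (by rw [h]; decide)]
  · simp [pvCharEq c '5' (by rw [h]; decide)]
  · simp [pvCharEq c '6' (by rw [h]; decide)]
  · simp [pvCharEq c '7' (by rw [h]; decide)]
  · simp [pvCharEq c '8' (by rw [h]; decide)]
  · simp [pvCharEq c '9' (by rw [h]; decide)]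

theorem pvCharInt_eq (c : Char) (h : '0' ≤ c ∧ c ≤ '9') : pvCharInt c = ((c.toNat : Int) - 48) := by
  rcases pvDigit_cases c h with e|e|e|e|e|e|e|e|e|e <;> subst e <;> decide

theorem pvDigitChar_dval (c : Char) (h : '0' ≤ c ∧ c ≤ '9') : Nat.digitChar (c.toNat - 48) = c := by
  rcases pvDigit_cases c h with e|e|e|e|e|e|e|e|e|e <;> subst e <;> decide

theorem pvDigitChar_digit (k : Nat) (h : k ≤ 9) :
    ('0' ≤ Nat.digitChar k ∧ Nat.digitChar k ≤ '9') ∧ (Nat.digitChar k).toNat - 48 = k := by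
  interval_cases k <;> exact ⟨by constructor <;> decide, by decide⟩

theorem pvDigitChar_ne_zero (k : Nat) (h1 : 1 ≤ k) (h9 : k ≤ 9) : Nat.digitChar k ≠ '0' := by
  interval_cases k <;> decide

theorem pvDval_le (c : Char) (h : '0' ≤ c ∧ c ≤ '9') : c.toNat - 48 ≤ 9 := by
  have h9 := pvCharToNatLe _ _ h.2
  have e9 : ('9' : Char).toNat = 57 := by decide
  omega

/- ## Value lemmas -/

theorem pvVal_from (cs : List Char) : ∀ a : Nat,
    cs.foldl (fun a c => 10 * a + (c.toNat - 48)) a = a * 10 ^ cs.length + pvVal cs := by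
  induction cs with
  | nil => intro a; simp [pvVal]
  | cons c cs ih =>
    intro a
    show cs.foldl _ (10 * a + (c.toNat - 48)) = _
    rw [ih]
    have h2 : pvVal (c :: cs) = cs.foldl (fun a c => 10 * a + (c.toNat - 48)) (10 * 0 + (c.toNat - 48)) := rfl
    rw [h2, ih]
    simp [List.length_cons, pow_succ]
    ring

theorem pvVal_append (xs ys : List Char) :
    pvVal (xs ++ ys) = pvVal xs * 10 ^ ys.length + pvVal ys := by
  show (xs ++ ys).foldl _ 0 = _
  rw [List.foldl_append]
  exact pvVal_from ys (pvVal xs)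

theorem pvVal_snoc (xs : List Char) (c : Char) : pvVal (xs ++ [c]) = 10 * pvVal xs + (c.toNat - 48) := by
  rw [pvVal_append]
  have h1 : pvVal [c] = c.toNat - 48 := by simp [pvVal]
  rw [h1]
  simp [mul_comm]

theorem pvVal_cons (c : Char) (cs : List Char) :
    pvVal (c :: cs) = (c.toNat - 48) * 10 ^ cs.length + pvVal cs := by
  show cs.foldl _ (10 * 0 + (c.toNat - 48)) = _
  rw [pvVal_from]; ring_nf

theorem pvVal_lt (cs : List Char) (h : pvDig cs) : pvVal cs < 10 ^ cs.length := by
  induction cs with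
  | nil => simp [pvVal]
  | cons c cs ih =>
    have hc := pvDval_le c (h c (by simp))
    have ht := ih (fun x hx => h x (by simp [hx]))
    rw [pvVal_cons]
    have h10 : (c.toNat - 48) * 10 ^ cs.length ≤ 9 * 10 ^ cs.length :=
      Nat.mul_le_mul_right _ hc
    calc (c.toNat - 48) * 10 ^ cs.length + pvVal cs
        < (c.toNat - 48) * 10 ^ cs.length + 10 ^ cs.length := by omega
      _ ≤ 9 * 10 ^ cs.length + 10 ^ cs.length := by omega
      _ = 10 ^ (c :: cs).length := by simp [pow_succ]; ring

theorem pvVal_ge (cs : List Char) (h : pvDig cs) (hne : cs ≠ []) (hh : cs.head? ≠ some '0') :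
    10 ^ (cs.length - 1) ≤ pvVal cs := by
  obtain ⟨c, t, rfl⟩ : ∃ c t, cs = c :: t := by
    cases cs with
    | nil => exact absurd rfl hne
    | cons c t => exact ⟨c, t, rfl⟩
  have hc : c ≠ '0' := by simpa using hh
  have hd := h c (by simp)
  have h48 : 48 ≤ c.toNat := by
    have := pvCharToNatLe _ _ hd.1
    have e : ('0' : Char).toNat = 48 := by decide
    omega
  have hd1 : 1 ≤ c.toNat - 48 := by
    rcases Nat.eq_or_lt_of_le h48 with he | hlt
    · exact absurd (pvCharEq c '0' (by rw [← he]; decide)).symm (Ne.symm hc)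
    · omega
  rw [pvVal_cons]
  have h2 : 10 ^ t.length ≤ (c.toNat - 48) * 10 ^ t.length := Nat.le_mul_of_pos_left _ hd1
  simpa using le_trans h2 (Nat.le_add_right _ _)

theorem pvVal_pos (cs : List Char) (h : pvDig cs) (hne : cs ≠ []) (hh : cs.head? ≠ some '0') :
    1 ≤ pvVal cs := by
  have := pvVal_ge cs h hne hh
  have h1 : 1 ≤ 10 ^ (cs.length - 1) := Nat.one_le_pow _ _ (by norm_num)
  omega

/- ## Canonical representation -/

theorem pvNatRepr_zero : pvNatRepr 0 = [] := by simp [pvNatRepr]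

theorem pvNatRepr_succ (n : Nat) (h : 0 < n) :
    pvNatRepr n = pvNatRepr (n / 10) ++ [Nat.digitChar (n % 10)] := by
  unfold pvNatRepr
  rw [Nat.digits_def' (by norm_num : (1:Nat) < 10) h]
  simp

theorem pvNatRepr_dig (n : Nat) : pvDig (pvNatRepr n) := by
  intro c hc
  simp only [pvNatRepr, List.mem_reverse, List.mem_map] at hc
  obtain ⟨d, hd, rfl⟩ := hc
  have := Nat.digits_lt_base (by norm_num) hd
  exact (pvDigitChar_digit d (by omega)).1

theorem pvCanon_dig (n : Nat) : pvDig (pvCanon n) := by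
  unfold pvCanon
  split
  · intro c hc; simp at hc; subst hc; constructor <;> decide
  · exact pvNatRepr_dig n

theorem pvNatRepr_val (n : Nat) : pvVal (pvNatRepr n) = n := by
  induction n using Nat.strong_induction_on with
  | _ n ih =>
    rcases Nat.eq_zero_or_pos n with rfl | hn
    · simp [pvNatRepr_zero, pvVal]
    · rw [pvNatRepr_succ n hn, pvVal_snoc, ih (n / 10) (Nat.div_lt_self hn (by norm_num)),
        (pvDigitChar_digit (n % 10) (by omega)).2]
      omega

theorem pvNatRepr_head (n : Nat) (h : 0 < n) : (pvNatRepr n).head? ≠ some '0' := by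
  have hne : Nat.digits 10 n ≠ [] := Nat.digits_ne_nil_iff_ne_zero.mpr (by omega)
  have hlast := Nat.getLast_digit_ne_zero 10 (m := n) (by omega)
  unfold pvNatRepr
  rw [List.head?_reverse, List.getLast?_map]
  rw [List.getLast?_eq_some_getLast (h := hne)]
  simp only [Option.map_some]
  intro heq
  have hmem : (Nat.digits 10 n).getLast hne ∈ Nat.digits 10 n := List.getLast_mem hne
  have hlt := Nat.digits_lt_base (by norm_num) hmem
  have h9 := pvDigitChar_ne_zero ((Nat.digits 10 n).getLast hne) (by omega) (by omega)
  simp at heq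
  exact h9 heq

theorem pvNatRepr_ne_nil (n : Nat) (h : 0 < n) : pvNatRepr n ≠ [] := by
  unfold pvNatRepr
  simp [Nat.digits_ne_nil_iff_ne_zero]
  omega

theorem pvNatRepr_len_le (n k : Nat) (h : n < 10 ^ k) : (pvNatRepr n).length ≤ k := by
  rcases Nat.eq_zero_or_pos n with rfl | hn
  · simp [pvNatRepr_zero]
  · have hlb := pvVal_ge (pvNatRepr n) (pvNatRepr_dig n) (pvNatRepr_ne_nil n hn) (pvNatRepr_head n hn)
    rw [pvNatRepr_val] at hlb
    by_contra hk
    push Not at hk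
    have : 10 ^ k ≤ 10 ^ ((pvNatRepr n).length - 1) :=
      Nat.pow_le_pow_right (by norm_num) (by omega)
    omega

theorem pvNatRepr_small (m : Nat) (h1 : 1 ≤ m) (h9 : m ≤ 9) : pvNatRepr m = [Nat.digitChar m] := by
  rw [pvNatRepr_succ m (by omega), Nat.div_eq_of_lt (by omega), Nat.mod_eq_of_lt (by omega),
    pvNatRepr_zero]
  simp

theorem pvRepr_roundtrip (cs : List Char) (h : pvDig cs) (hne : cs ≠ []) (hh : cs.head? ≠ some '0') :
    pvNatRepr (pvVal cs) = cs := by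
  induction cs using List.reverseRecOn with
  | nil => exact absurd rfl hne
  | append_singleton xs c ih =>
    rcases List.eq_nil_or_concat xs with rfl | _
    · have hc : c ≠ '0' := by simpa using hh
      have hd := h c (by simp)
      have h48 : 48 ≤ c.toNat := by
        have := pvCharToNatLe _ _ hd.1
        have e : ('0' : Char).toNat = 48 := by decide
        omega
      have h57 : c.toNat ≤ 57 := by
        have := pvCharToNatLe _ _ hd.2
        have e : ('9' : Char).toNat = 57 := by decide
        omega
      have hd1 : 1 ≤ c.toNat - 48 := by
        rcases Nat.eq_or_lt_of_le h48 with he | hlt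
        · exact absurd (pvCharEq c '0' (by rw [← he]; decide)).symm (Ne.symm hc)
        · omega
      have hv : pvVal [c] = c.toNat - 48 := by simp [pvVal]
      simp only [List.nil_append, hv]
      rw [pvNatRepr_small _ (by omega) (by omega), pvDigitChar_dval c hd]
    · have hxs : xs ≠ [] := by rintro rfl; simp_all
      have hh' : xs.head? ≠ some '0' := by
        cases xs with
        | nil => exact absurd rfl hxs
        | cons a t => simpa using hh
      have hdx : pvDig xs := fun x hx => h x (by simp [hx])
      have ihx := ih hdx hxs hh'
      have hvpos := pvVal_pos xs hdx hxs hh'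
      have hdc := h c (by simp)
      have hdle := pvDval_le c hdc
      rw [pvVal_snoc]
      rw [pvNatRepr_succ _ (by omega)]
      have e1 : (10 * pvVal xs + (c.toNat - 48)) / 10 = pvVal xs := by omega
      have e2 : (10 * pvVal xs + (c.toNat - 48)) % 10 = c.toNat - 48 := by omega
      rw [e1, e2, ihx, pvDigitChar_dval c hdc]

theorem pvCanon_eq_zero_iff (r : Nat) : pvCanon r = ['0'] ↔ r = 0 := by
  unfold pvCanon
  split
  · simp_all
  · rename_i hr
    constructor
    · intro heq
      have h1 := pvNatRepr_val r
      rw [heq] at h1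
      simp [pvVal] at h1
      omega
    · intro h; exact absurd h hr

/- ## str(n) and lstrip -/

theorem pvToDigitsCore_eq (fuel : Nat) : ∀ (m : Nat) (ds : List Char), m < fuel →
    Nat.toDigitsCore 10 fuel m ds = (if m = 0 then ['0'] else pvNatRepr m) ++ ds := by
  induction fuel with
  | zero => intro m ds h; omega
  | succ f ih =>
    intro m ds h
    rw [Nat.toDigitsCore]
    by_cases h10 : m / 10 = 0
    · simp only [h10]
      rcases Nat.eq_zero_or_pos m with rfl | hm
      · simp; decide
      · have hm9 : m ≤ 9 := by omega
        rw [if_neg (by omega : ¬ m = 0), pvNatRepr_small m (by omega) hm9, Nat.mod_eq_of_lt (by omega)]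
        simp
    · simp only [if_neg h10]
      have hm : 0 < m := by omega
      have hrec : m / 10 < f := by
        have h1 : m / 10 < m := Nat.div_lt_self hm (by norm_num)
        omega
      rw [ih (m / 10) _ hrec, if_neg h10]
      rw [pvNatRepr_succ m hm, if_neg (by omega : ¬ m = 0)]
      simp

theorem pvToChars_natCast (m : Nat) : PySem.Int.toChars (m : Int) = pvCanon m := by
  unfold PySem.Int.toChars
  rw [if_neg (by omega)]
  have h1 : ((m : Int)).toNat = m := rfl
  rw [h1]
  show Nat.toDigitsCore 10 (m + 1) m [] = _
  rw [pvToDigitsCore_eq (m + 1) m [] (by omega)]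
  unfold pvCanon
  simp

theorem pvCanon_small (m : Nat) (h : m ≤ 9) : pvCanon m = [Nat.digitChar m] := by
  unfold pvCanon
  rcases Nat.eq_zero_or_pos m with rfl | hm
  · simp; decide
  · rw [if_neg (by omega)]
    exact pvNatRepr_small m hm h

theorem pvToChars_small (d : Int) (h0 : 0 ≤ d) (h9 : d ≤ 9) :
    PySem.Int.toChars d = [Nat.digitChar d.toNat] := by
  have h1 : d = ((d.toNat : Nat) : Int) := by omega
  rw [h1, pvToChars_natCast, pvCanon_small _ (by omega)]
  have h2 : ((d.toNat : Int)).toNat = d.toNat := by omega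
  rw [h2]

theorem pvLstrip0_replicate (k : Nat) (t : List Char) :
    pvLstrip0 (List.replicate k '0' ++ t) = pvLstrip0 t := by
  induction k with
  | zero => simp
  | succ f ih =>
    rw [List.replicate_succ, List.cons_append]
    simp only [pvLstrip0, List.dropWhile]
    exact ih

theorem pvLstrip0_head (cs t : List Char) (hne : cs ≠ []) (hh : cs.head? ≠ some '0') :
    pvLstrip0 (cs ++ t) = cs ++ t := by
  cases cs with
  | nil => exact absurd rfl hne
  | cons c cs =>
    have hc : c ≠ '0' := by simpa using hh
    simp [pvLstrip0, hc]

theorem pvLstrip0_canon_or (r : Nat) :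
    (if pvLstrip0 (pvCanon r) = [] then ['0'] else pvLstrip0 (pvCanon r)) = pvCanon r := by
  unfold pvCanon
  split
  · simp [pvLstrip0]
  · rename_i hr
    have h1 : pvLstrip0 (pvNatRepr r ++ []) = pvNatRepr r ++ [] :=
      pvLstrip0_head _ [] (pvNatRepr_ne_nil r (by omega)) (pvNatRepr_head r (by omega))
    simp only [List.append_nil] at h1
    rw [h1, if_neg (pvNatRepr_ne_nil r (by omega))]

/- ## Comparison -/

theorem pvCharLt (c d : Char) : c < d ↔ c.toNat < d.toNat := by
  rw [Char.lt_def, UInt32.lt_iff_toNat_lt]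
  exact Iff.rfl

theorem pvDigit_bounds (c : Char) (h : '0' ≤ c ∧ c ≤ '9') : 48 ≤ c.toNat ∧ c.toNat ≤ 57 := by
  have h1 := pvCharToNatLe _ _ h.1
  have h2 := pvCharToNatLe _ _ h.2
  have e0 : ('0' : Char).toNat = 48 := by decide
  have e9 : ('9' : Char).toNat = 57 := by decide
  omega

theorem pvHorner_lt (P a1 a2 x y : Nat) (hx : x < P) (ha : a1 < a2) : a1 * P + x < a2 * P + y := by
  nlinarith

theorem pvLex_val (a : List Char) : ∀ (b : List Char), pvDig a → pvDig b → a.length = b.length →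
    (a < b ↔ pvVal a < pvVal b) := by
  induction a with
  | nil =>
    intro b _ _ hl
    have : b = [] := by cases b with
      | nil => rfl
      | cons d ds => simp at hl
    subst this
    simp [pvVal]
  | cons c cs ih =>
    intro b ha hb hl
    cases b with
    | nil => simp at hl
    | cons d ds =>
      have hL : cs.length = ds.length := by simpa using hl
      have hdc := ha c (by simp)
      have hdd := hb d (by simp)
      have hbc := pvDigit_bounds c hdc
      have hbd := pvDigit_bounds d hdd
      have hvc := pvVal_lt cs (fun x hx => ha x (by simp [hx]))
      have hvd := pvVal_lt ds (fun x hx => hb x (by simp [hx]))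
      rw [List.cons_lt_cons_iff, pvVal_cons, pvVal_cons, hL]
      constructor
      · rintro (hlt | ⟨rfl, htail⟩)
        · have := (pvCharLt c d).mp hlt
          exact pvHorner_lt _ _ _ _ _ (hL ▸ hvc) (by omega)
        · have := (ih ds (fun x hx => ha x (by simp [hx])) (fun x hx => hb x (by simp [hx])) hL).mp htail
          omega
      · intro hv
        rcases lt_trichotomy c d with hlt | heq | hgt
        · exact Or.inl hlt
        · subst heq
          refine Or.inr ⟨rfl, ?_⟩
          exact (ih ds (fun x hx => ha x (by simp [hx])) (fun x hx => hb x (by simp [hx])) hL).mpr (by omega)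
        · have h1 := (pvCharLt d c).mp hgt
          have h2 : 48 ≤ d.toNat := hbd.1
          have hH := pvHorner_lt (10 ^ ds.length) (d.toNat - 48) (c.toNat - 48) (pvVal ds) (pvVal cs) hvd (by omega)
          omega

theorem pvReprVal_inj (x y : Nat) (h : pvNatRepr x = pvNatRepr y) : x = y := by
  have := pvNatRepr_val x
  rw [h, pvNatRepr_val] at this
  omega

theorem pvCmp_canon_ge (r b : Nat) (hb : 1 ≤ b) :
    (pvCmp (pvCanon r) (pvNatRepr b) ≥ 0) ↔ b ≤ r := by
  have hdb := pvNatRepr_dig b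
  have hnb := pvNatRepr_ne_nil b (by omega)
  have hhb := pvNatRepr_head b (by omega)
  have hlb2 : 1 ≤ (pvNatRepr b).length := by
    cases h : pvNatRepr b with
    | nil => exact absurd h hnb
    | cons x xs => simp
  rcases Nat.eq_zero_or_pos r with rfl | hr
  · have hc : pvCanon 0 = ['0'] := rfl
    rw [hc]
    unfold pvCmp
    have hrhs : ¬ b ≤ 0 := by omega
    simp only [hrhs, iff_false]
    by_cases hlen : (1 : Nat) > (pvNatRepr b).length
    · omega
    · rw [if_neg (by simpa using hlen)]
      by_cases hlen2 : (1 : Nat) < (pvNatRepr b).length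
      · rw [if_pos (by simpa [List.length_singleton] using hlen2)]; norm_num
      · have hle : (pvNatRepr b).length = 1 := by omega
        rw [if_neg (by simp [hle])]
        have hne : ['0'] ≠ pvNatRepr b := by
          intro heq
          have := pvNatRepr_val b
          rw [← heq] at this
          simp [pvVal] at this
          omega
        rw [if_neg hne]
        have hlex : ¬ pvNatRepr b < ['0'] := by
          rw [pvLex_val _ _ hdb (by intro x hx; simp at hx; subst hx; constructor <;> decide) (by simp [hle])]
          rw [pvNatRepr_val]
          simp [pvVal]
        rw [if_neg hlex]
        norm_num
  · have hc : pvCanon r = pvNatRepr r := by unfold pvCanon; rw [if_neg (by omega)]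
    rw [hc]
    have hdr := pvNatRepr_dig r
    have hnr := pvNatRepr_ne_nil r hr
    have hhr := pvNatRepr_head r hr
    have hub_r := pvVal_lt (pvNatRepr r) hdr
    have hlb_r := pvVal_ge (pvNatRepr r) hdr hnr hhr
    have hub_b := pvVal_lt (pvNatRepr b) hdb
    have hlb_b := pvVal_ge (pvNatRepr b) hdb hnb hhb
    rw [pvNatRepr_val] at hub_r hlb_r
    rw [pvNatRepr_val] at hub_b hlb_b
    unfold pvCmp
    by_cases h1 : (pvNatRepr r).length > (pvNatRepr b).length
    · rw [if_pos h1]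
      have hp : (10:Nat) ^ (pvNatRepr b).length ≤ 10 ^ ((pvNatRepr r).length - 1) :=
        Nat.pow_le_pow_right (by norm_num) (by omega)
      constructor
      · intro _; omega
      · intro _; norm_num
    · rw [if_neg h1]
      by_cases h2 : (pvNatRepr r).length < (pvNatRepr b).length
      · rw [if_pos h2]
        have hp : (10:Nat) ^ (pvNatRepr r).length ≤ 10 ^ ((pvNatRepr b).length - 1) :=
          Nat.pow_le_pow_right (by norm_num) (by omega)
        constructor
        · intro hx; norm_num at hx
        · intro hx; omega
      · have hL : (pvNatRepr r).length = (pvNatRepr b).length := by omega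
        rw [if_neg h2]
        by_cases h3 : pvNatRepr r = pvNatRepr b
        · rw [if_pos h3]
          have := pvReprVal_inj r b h3
          constructor
          · intro _; omega
          · intro _; norm_num
        · rw [if_neg h3]
          have hlex := pvLex_val (pvNatRepr b) (pvNatRepr r) hdb hdr hL.symm
          rw [pvNatRepr_val, pvNatRepr_val] at hlex
          have hrb : r ≠ b := fun heq => h3 (by rw [heq])
          by_cases h4 : pvNatRepr b < pvNatRepr r
          · rw [if_pos h4]
            have := hlex.mp h4
            constructor
            · intro _; omega
            · intro _; norm_num
          · rw [if_neg h4]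
            have hnb' : ¬ b < r := fun hx => h4 (hlex.mpr hx)
            constructor
            · intro hx; norm_num at hx
            · intro hx; omega

/- ## Subtraction -/

def pvPad : Nat → Nat → List Char
  | 0, _ => []
  | k + 1, v => pvPad k (v / 10) ++ [Nat.digitChar (v % 10)]

theorem pvVal_replicate (k : Nat) : pvVal (List.replicate k '0') = 0 := by
  induction k with
  | zero => simp [pvVal]
  | succ f ih =>
    rw [List.replicate_succ, pvVal_cons, ih]
    have h0 : ('0' : Char).toNat - 48 = 0 := by decide
    rw [h0]
    ring

theorem pvPad_eq (k : Nat) : ∀ v : Nat, v < 10 ^ k →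
    pvPad k v = List.replicate (k - (pvNatRepr v).length) '0' ++ pvNatRepr v := by
  induction k with
  | zero =>
    intro v hv
    have : v = 0 := by simpa using hv
    subst this
    simp [pvPad, pvNatRepr_zero]
  | succ f ih =>
    intro v hv
    rcases Nat.eq_zero_or_pos v with rfl | hvp
    · show pvPad f (0 / 10) ++ [Nat.digitChar (0 % 10)] = _
      rw [Nat.zero_div, ih 0 (Nat.one_le_pow _ _ (by norm_num)), pvNatRepr_zero]
      have hd0 : Nat.digitChar (0 % 10) = '0' := by decide
      rw [hd0]
      simp [List.replicate_succ']
    · show pvPad f (v / 10) ++ [Nat.digitChar (v % 10)] = _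
      have hdiv : v / 10 < 10 ^ f := by
        rw [Nat.div_lt_iff_lt_mul (by norm_num)]
        calc v < 10 ^ (f + 1) := hv
          _ = 10 ^ f * 10 := by rw [pow_succ]
      rw [ih (v / 10) hdiv]
      rw [pvNatRepr_succ v hvp]
      have hlen : (pvNatRepr v).length = (pvNatRepr (v / 10)).length + 1 := by
        rw [pvNatRepr_succ v hvp]; simp
      have hle : (pvNatRepr (v / 10)).length ≤ f := pvNatRepr_len_le _ _ hdiv
      simp only [List.length_append, List.length_cons, List.length_nil]
      rw [show f + 1 - ((pvNatRepr (v / 10)).length + (0 + 1)) = f - (pvNatRepr (v / 10)).length by omega]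
      simp

theorem pvPad_split (k : Nat) : ∀ v : Nat, v < 10 ^ (k + 1) →
    pvPad (k + 1) v = Nat.digitChar (v / 10 ^ k) :: pvPad k (v % 10 ^ k) := by
  induction k with
  | zero =>
    intro v hv
    show pvPad 0 (v / 10) ++ [Nat.digitChar (v % 10)] = _
    simp [pvPad, Nat.mod_eq_of_lt (by simpa using hv)]
  | succ f ih =>
    intro v hv
    show pvPad (f + 1) (v / 10) ++ [Nat.digitChar (v % 10)] = _
    have hdiv : v / 10 < 10 ^ (f + 1) := by
      rw [Nat.div_lt_iff_lt_mul (by norm_num)]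
      calc v < 10 ^ (f + 2) := hv
        _ = 10 ^ (f + 1) * 10 := by rw [pow_succ]
    rw [ih (v / 10) hdiv]
    have e1 : v / 10 / 10 ^ f = v / 10 ^ (f + 1) := by
      rw [Nat.div_div_eq_div_mul, pow_succ, mul_comm]
    have e2 : v / 10 % 10 ^ f = v % 10 ^ (f + 1) / 10 := by
      conv_lhs => rw [← Nat.mod_add_div v (10 ^ (f + 1))]
      have h10 : 10 ^ (f + 1) = 10 * 10 ^ f := by rw [pow_succ, mul_comm]
      rw [h10]
      rw [show v % (10 * 10 ^ f) + 10 * 10 ^ f * (v / (10 * 10 ^ f))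
            = v % (10 * 10 ^ f) + 10 * (10 ^ f * (v / (10 * 10 ^ f))) by ring]
      rw [Nat.add_mul_div_left _ _ (by norm_num : (0:Nat) < 10)]
      rw [Nat.add_mul_mod_self_left]
      have hrem : v % (10 * 10 ^ f) / 10 < 10 ^ f := by
        rw [Nat.div_lt_iff_lt_mul (by norm_num)]
        have := Nat.mod_lt v (y := 10 * 10 ^ f) (by positivity)
        calc v % (10 * 10 ^ f) < 10 * 10 ^ f := this
          _ = 10 ^ f * 10 := by ring
      rw [Nat.mod_eq_of_lt hrem]
    have e3 : v % 10 = v % 10 ^ (f + 1) % 10 := by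
      rw [Nat.mod_mod_of_dvd]
      exact ⟨10 ^ f, by rw [pow_succ, mul_comm]⟩
    rw [e1, e2, e3]
    show _ = Nat.digitChar (v / 10 ^ (f + 1)) :: (pvPad f (v % 10 ^ (f + 1) / 10) ++ [Nat.digitChar (v % 10 ^ (f + 1) % 10)])
    simp

theorem pvLstrip0_pad (k v : Nat) (h : v < 10 ^ k) :
    pvLstrip0 (pvPad k v) = if v = 0 then [] else pvNatRepr v := by
  rw [pvPad_eq k v h, pvLstrip0_replicate]
  rcases Nat.eq_zero_or_pos v with rfl | hv
  · simp [pvNatRepr_zero, pvLstrip0]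
  · rw [if_neg (by omega)]
    have := pvLstrip0_head (pvNatRepr v) [] (pvNatRepr_ne_nil v hv) (pvNatRepr_head v hv)
    simpa using this

theorem pvZfill_eq (cs : List Char) (m : Nat) (h : pvDig cs) (hne : cs ≠ []) (hm : cs.length ≤ m) :
    PySem.Chars.zfill cs (m : Int) = List.replicate (m - cs.length) '0' ++ cs := by
  unfold PySem.Chars.zfill
  by_cases heq : (m : Int) ≤ (cs.length : Int)
  · have : m = cs.length := by omega
    subst this
    rw [if_pos heq]
    simp
  · rw [if_neg heq]
    cases cs with
    | nil => exact absurd rfl hne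
    | cons c rest =>
      have hd := h c (by simp)
      have hb := pvDigit_bounds c hd
      have hcp : ¬ (c = '+' ∨ c = '-') := by
        rintro (rfl | rfl) <;> simp at hb
      show (if c = '+' ∨ c = '-' then c :: (List.replicate (((m : Int)).toNat - (c :: rest).length) '0' ++ rest)
            else List.replicate (((m : Int)).toNat - (c :: rest).length) '0' ++ c :: rest) = _
      rw [if_neg hcp]
      have hmn : ((m : Int)).toNat = m := by omega
      rw [hmn]

theorem pvSubLoop_spec (a b : List Char) (hl : a.length = b.length) (ha : pvDig a) (hb : pvDig b) :
    ∀ (k : Nat), k ≤ a.length → ∀ (borrow : Int) (res : List (List Char)),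
      (borrow = 0 ∨ borrow = 1) →
      pvVal (b.take k) + borrow.toNat ≤ pvVal (a.take k) →
      (pvSubLoop a b k borrow res).2
        = res ++ ((pvPad k (pvVal (a.take k) - pvVal (b.take k) - borrow.toNat)).reverse.map (fun c => [c])) := by
  intro k
  induction k generalizing a b with
  | zero =>
    intro _ borrow res _ _
    simp [pvSubLoop, pvPad]
  | succ k ih =>
    intro hk borrow res hbr hle
    have hka : k < a.length := by omega
    have hkb : k < b.length := by omega
    have hga : (PySem.List.pyGet? a (k : Int)).getD ' ' = a[k] := by
      rw [PySem.List.pyGet?_natCast, List.getElem?_eq_getElem hka]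
      rfl
    have hgb : (PySem.List.pyGet? b (k : Int)).getD ' ' = b[k] := by
      rw [PySem.List.pyGet?_natCast, List.getElem?_eq_getElem hkb]
      rfl
    have hda := ha a[k] (List.getElem_mem hka)
    have hdb := hb b[k] (List.getElem_mem hkb)
    have hba := pvDigit_bounds _ hda
    have hbb := pvDigit_bounds _ hdb
    have hta : a.take (k + 1) = a.take k ++ [a[k]] := by
      rw [List.take_add_one, List.getElem?_eq_getElem hka]
      rfl
    have htb : b.take (k + 1) = b.take k ++ [b[k]] := by
      rw [List.take_add_one, List.getElem?_eq_getElem hkb]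
      rfl
    have hva : pvVal (a.take (k + 1)) = 10 * pvVal (a.take k) + (a[k].toNat - 48) := by
      rw [hta, pvVal_snoc]
    have hvb : pvVal (b.take (k + 1)) = 10 * pvVal (b.take k) + (b[k].toNat - 48) := by
      rw [htb, pvVal_snoc]
    have hle' : 10 * pvVal (b.take k) + (b[k].toNat - 48) + borrow.toNat
        ≤ 10 * pvVal (a.take k) + (a[k].toNat - 48) := by
      rw [← hva, ← hvb]; exact hle
    show (pvSubLoop a b k _ _).2 = _
    rw [hga, hgb, pvCharInt_eq _ hda, pvCharInt_eq _ hdb]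
    by_cases hlt : ((a[k].toNat : Int) - 48) < ((b[k].toNat : Int) - 48) + borrow
    · rw [if_pos hlt]
      have hrec : pvVal (b.take k) + (1 : Int).toNat ≤ pvVal (a.take k) := by omega
      rw [ih a b hl ha hb (by omega) 1 _ (Or.inr rfl) hrec]
      have hsm : PySem.Int.toChars (((a[k].toNat : Int) - 48) + 10 - (((b[k].toNat : Int) - 48) + borrow))
          = [Nat.digitChar ((((a[k].toNat : Int) - 48) + 10 - (((b[k].toNat : Int) - 48) + borrow)).toNat)] := by
        apply pvToChars_small <;> omega
      show res ++ [PySem.Int.toChars _] ++ _ = _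
      rw [hsm]
      have hpad : pvPad (k + 1) (pvVal (a.take (k+1)) - pvVal (b.take (k+1)) - borrow.toNat)
          = pvPad k (pvVal (a.take k) - pvVal (b.take k) - (1 : Int).toNat)
            ++ [Nat.digitChar ((((a[k].toNat : Int) - 48) + 10 - (((b[k].toNat : Int) - 48) + borrow)).toNat)] := by
        show pvPad k _ ++ [Nat.digitChar _] = _
        rw [hva, hvb]
        have e1 : (10 * pvVal (a.take k) + (a[k].toNat - 48) - (10 * pvVal (b.take k) + (b[k].toNat - 48)) - borrow.toNat) / 10
            = pvVal (a.take k) - pvVal (b.take k) - (1 : Int).toNat := by omega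
        have e2 : (10 * pvVal (a.take k) + (a[k].toNat - 48) - (10 * pvVal (b.take k) + (b[k].toNat - 48)) - borrow.toNat) % 10
            = ((((a[k].toNat : Int) - 48) + 10 - (((b[k].toNat : Int) - 48) + borrow)).toNat) := by omega
        rw [e1, e2]
      rw [hpad]
      simp
    · rw [if_neg hlt]
      have hrec : pvVal (b.take k) + (0 : Int).toNat ≤ pvVal (a.take k) := by omega
      rw [ih a b hl ha hb (by omega) 0 _ (Or.inl rfl) hrec]
      have hsm : PySem.Int.toChars (((a[k].toNat : Int) - 48) - (((b[k].toNat : Int) - 48) + borrow))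
          = [Nat.digitChar ((((a[k].toNat : Int) - 48) - (((b[k].toNat : Int) - 48) + borrow)).toNat)] := by
        apply pvToChars_small <;> omega
      show res ++ [PySem.Int.toChars _] ++ _ = _
      rw [hsm]
      have hpad : pvPad (k + 1) (pvVal (a.take (k+1)) - pvVal (b.take (k+1)) - borrow.toNat)
          = pvPad k (pvVal (a.take k) - pvVal (b.take k) - (0 : Int).toNat)
            ++ [Nat.digitChar ((((a[k].toNat : Int) - 48) - (((b[k].toNat : Int) - 48) + borrow)).toNat)] := by
        show pvPad k _ ++ [Nat.digitChar _] = _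
        rw [hva, hvb]
        have e1 : (10 * pvVal (a.take k) + (a[k].toNat - 48) - (10 * pvVal (b.take k) + (b[k].toNat - 48)) - borrow.toNat) / 10
            = pvVal (a.take k) - pvVal (b.take k) - (0 : Int).toNat := by omega
        have e2 : (10 * pvVal (a.take k) + (a[k].toNat - 48) - (10 * pvVal (b.take k) + (b[k].toNat - 48)) - borrow.toNat) % 10
            = ((((a[k].toNat : Int) - 48) - (((b[k].toNat : Int) - 48) + borrow)).toNat) := by omega
        rw [e1, e2]
      rw [hpad]
      simp

theorem pvFlatten_singletons (l : List Char) : (l.map (fun c => [c])).flatten = l := by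
  induction l with
  | nil => rfl
  | cons c cs ih => simp [ih]

theorem pvSubtract_spec (x y : List Char) (hx : pvDig x) (hy : pvDig y)
    (hnx : x ≠ []) (hny : y ≠ []) (hle : pvVal y ≤ pvVal x) :
    pvSubtract x y = pvCanon (pvVal x - pvVal y) := by
  show (if pvLstrip0 ((pvSubLoop (PySem.Chars.zfill x ((max x.length y.length : Nat) : Int))
          (PySem.Chars.zfill y ((max x.length y.length : Nat) : Int)) (max x.length y.length) 0 []).2).reverse.flatten = []
        then ['0']
        else pvLstrip0 ((pvSubLoop (PySem.Chars.zfill x ((max x.length y.length : Nat) : Int))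
          (PySem.Chars.zfill y ((max x.length y.length : Nat) : Int)) (max x.length y.length) 0 []).2).reverse.flatten) = _
  set m := max x.length y.length with hm
  have hxm : x.length ≤ m := le_max_left _ _
  have hym : y.length ≤ m := le_max_right _ _
  rw [pvZfill_eq x m hx hnx hxm, pvZfill_eq y m hy hny hym]
  set a := List.replicate (m - x.length) '0' ++ x with hadef
  set b := List.replicate (m - y.length) '0' ++ y with hbdef
  have hla : a.length = m := by rw [hadef]; simp; omega
  have hlb : b.length = m := by rw [hbdef]; simp; omega
  have hda : pvDig a := by
    intro c hc
    rw [hadef] at hc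
    rcases List.mem_append.mp hc with h | h
    · have := List.eq_of_mem_replicate h; subst this; constructor <;> decide
    · exact hx c h
  have hdb : pvDig b := by
    intro c hc
    rw [hbdef] at hc
    rcases List.mem_append.mp hc with h | h
    · have := List.eq_of_mem_replicate h; subst this; constructor <;> decide
    · exact hy c h
  have hvala : pvVal a = pvVal x := by
    rw [hadef, pvVal_append, pvVal_replicate]
    simp
  have hvalb : pvVal b = pvVal y := by
    rw [hbdef, pvVal_append, pvVal_replicate]
    simp
  have htka : a.take m = a := by rw [← hla]; exact List.take_length
  have htkb : b.take m = b := by rw [← hlb]; exact List.take_length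
  have hspec := pvSubLoop_spec a b (by omega) hda hdb m (by omega) 0 [] (Or.inl rfl)
    (by rw [htka, htkb, hvala, hvalb]; simpa using hle)
  rw [htka, htkb, hvala, hvalb] at hspec
  rw [hspec]
  have hD : pvVal x - pvVal y - (0 : Int).toNat = pvVal x - pvVal y := by simp
  rw [hD]
  set D := pvVal x - pvVal y with hDdef
  have hDlt : D < 10 ^ m := by
    have h1 := pvVal_lt x hx
    have h2 : (10:Nat) ^ x.length ≤ 10 ^ m := Nat.pow_le_pow_right (by norm_num) hxm
    omega
  have hflat : (([] ++ (pvPad m D).reverse.map (fun c => [c])).reverse).flatten = pvPad m D := by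
    rw [List.nil_append, ← List.map_reverse, List.reverse_reverse, pvFlatten_singletons]
  rw [hflat, pvLstrip0_pad m D hDlt]
  rcases Nat.eq_zero_or_pos D with hD0 | hDp
  · rw [hD0]
    simp [pvCanon]
  · rw [if_neg (show ¬ D = 0 by omega)]
    rw [if_neg (pvNatRepr_ne_nil D hDp)]
    unfold pvCanon
    rw [if_neg (show ¬ D = 0 by omega)]

/- ## The inner count loop -/

theorem pvCanon_val (r : Nat) : pvVal (pvCanon r) = r := by
  unfold pvCanon
  split
  · simp [pvVal]; omega
  · exact pvNatRepr_val r

theorem pvCanon_ne_nil (r : Nat) : pvCanon r ≠ [] := by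
  unfold pvCanon
  split
  · simp
  · exact pvNatRepr_ne_nil _ (by omega)

theorem pvCountLoop_spec (b : Nat) (hb : 1 ≤ b) :
    ∀ (fuel : Nat) (r : Nat) (count : Int), r / b < fuel →
      pvCountLoop (pvNatRepr b) fuel (pvCanon r) count = (pvCanon (r % b), count + ((r / b : Nat) : Int)) := by
  intro fuel
  induction fuel with
  | zero => intro r count h; exact absurd h (Nat.not_lt_zero _)
  | succ f ih =>
    intro r count h
    show (if pvCmp (pvCanon r) (pvNatRepr b) ≥ 0 then _ else _) = _
    by_cases hge : b ≤ r
    · rw [if_pos ((pvCmp_canon_ge r b hb).mpr hge)]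
      have hrpos : 0 < r := by omega
      have hsub : pvSubtract (pvCanon r) (pvNatRepr b) = pvCanon (r - b) := by
        rw [pvSubtract_spec (pvCanon r) (pvNatRepr b) (pvCanon_dig r) (pvNatRepr_dig b)
          (pvCanon_ne_nil r) (pvNatRepr_ne_nil b (by omega))
          (by rw [pvCanon_val, pvNatRepr_val]; exact hge)]
        rw [pvCanon_val, pvNatRepr_val]
      rw [hsub]
      have hdiv : r / b = (r - b) / b + 1 := by
        conv_lhs => rw [show r = (r - b) + b by omega]
        rw [Nat.add_div_right _ (by omega)]
      have hmod : (r - b) % b = r % b := by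
        conv_rhs => rw [show r = (r - b) + b by omega]
        rw [Nat.add_mod_right]
      rw [ih (r - b) (count + 1) (by omega)]
      rw [hmod]
      have : count + 1 + (((r - b) / b : Nat) : Int) = count + ((r / b : Nat) : Int) := by
        rw [hdiv]; push_cast; ring
      rw [this]
    · rw [if_neg (fun hx => hge ((pvCmp_canon_ge r b hb).mp hx))]
      rw [Nat.mod_eq_of_lt (by omega), Nat.div_eq_of_lt (by omega)]
      simp

/- ## The remainder-extension step -/

theorem pvStep_single (c : Char) (hc : '0' ≤ c ∧ c ≤ '9') :
    (if pvLstrip0 [c] = [] then ['0'] else pvLstrip0 [c]) = pvCanon (c.toNat - 48) := by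
  have hbc := pvDigit_bounds c hc
  by_cases hc0 : c = '0'
  · subst hc0
    have h1 : pvLstrip0 ['0'] = [] := by simp [pvLstrip0]
    rw [h1]
    have h2 : ('0' : Char).toNat - 48 = 0 := by decide
    rw [h2]
    simp [pvCanon]
  · have h1 : pvLstrip0 [c] = [c] := by simp [pvLstrip0, hc0]
    rw [h1, if_neg (by simp)]
    have hd1 : 1 ≤ c.toNat - 48 := by
      rcases Nat.eq_or_lt_of_le hbc.1 with he | hlt
      · exact absurd (pvCharEq c '0' (by rw [← he]; decide)).symm (Ne.symm hc0)
      · omega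
    rw [pvCanon_small _ (by omega), pvDigitChar_dval c hc]

theorem pvStep_rem (rem : List Char) (r : Nat) (c : Char) (hc : '0' ≤ c ∧ c ≤ '9')
    (h : rem = pvCanon r ∨ (rem = [] ∧ r = 0)) :
    (if pvLstrip0 (rem ++ [c]) = [] then ['0'] else pvLstrip0 (rem ++ [c]))
      = pvCanon (10 * r + (c.toNat - 48)) := by
  have hbc := pvDigit_bounds c hc
  rcases h with rfl | ⟨rfl, rfl⟩
  · rcases Nat.eq_zero_or_pos r with rfl | hr
    · have hcan : pvCanon 0 = ['0'] := rfl
      rw [hcan]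
      have h1 : (['0'] : List Char) ++ [c] = List.replicate 1 '0' ++ [c] := rfl
      rw [h1, pvLstrip0_replicate]
      simpa using pvStep_single c hc
    · have hcan : pvCanon r = pvNatRepr r := by unfold pvCanon; rw [if_neg (by omega)]
      rw [hcan]
      rw [pvLstrip0_head (pvNatRepr r) [c] (pvNatRepr_ne_nil r hr) (pvNatRepr_head r hr)]
      rw [if_neg (by simp [pvNatRepr_ne_nil r hr])]
      have hrhs : pvCanon (10 * r + (c.toNat - 48)) = pvNatRepr (10 * r + (c.toNat - 48)) := by
        unfold pvCanon; rw [if_neg (by omega)]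
      have e1 : (10 * r + (c.toNat - 48)) / 10 = r := by omega
      have e2 : (10 * r + (c.toNat - 48)) % 10 = c.toNat - 48 := by omega
      rw [hrhs]
      conv_rhs => rw [pvNatRepr_succ _ (by omega), e1, e2, pvDigitChar_dval c hc]
  · simpa using pvStep_single c hc

/- ## Loop phase specs -/

def pvFracSpec (b : Nat) : Nat → Int → Nat → List Char × Nat
  | 0, _, r => ([], r)
  | f + 1, dp, r =>
    if dp > 0 ∧ r ≠ 0 then
      (Nat.digitChar (10 * r / b) :: (pvFracSpec b f (dp - 1) (10 * r % b)).1,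
       (pvFracSpec b f (dp - 1) (10 * r % b)).2)
    else ([], r)

def pvIntSpec (b : Nat) : List Char → Nat → List Char × Nat
  | [], r => ([], r)
  | c :: cs, r =>
    (Nat.digitChar ((10 * r + (c.toNat - 48)) / b) :: (pvIntSpec b cs ((10 * r + (c.toNat - 48)) % b)).1,
     (pvIntSpec b cs ((10 * r + (c.toNat - 48)) % b)).2)

theorem pvPhase2_A (num1 : List Char) (b : Nat) (hb : 1 ≤ b) (n : Nat) :
    ∀ (f : Nat) (dp : Int) (r : Nat) (quot : List Char), r < b → dp ≤ (f : Int) →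
      pvDivLoop num1 (pvNatRepr b) n (f + 1) n dp (pvCanon r) quot
        = (quot ++ (pvFracSpec b f dp r).1, pvCanon (pvFracSpec b f dp r).2) := by
  intro f
  induction f with
  | zero =>
    intro dp r quot hr hdp
    show (if n < n ∨ (dp > 0 ∧ pvCanon r ≠ ['0']) then _ else _) = _
    rw [if_neg (by
      rintro (h | ⟨h1, _⟩)
      · exact lt_irrefl n h
      · simp at hdp; omega)]
    show (quot, pvCanon r) = _
    simp [pvFracSpec]
  | succ f ih =>
    intro dp r quot hr hdp
    by_cases hcond : dp > 0 ∧ r ≠ 0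
    · show (if n < n ∨ (dp > 0 ∧ pvCanon r ≠ ['0']) then _ else _) = _
      rw [if_pos (Or.inr ⟨hcond.1, fun he => hcond.2 ((pvCanon_eq_zero_iff r).mp he)⟩),
        if_neg (lt_irrefl n)]
      show pvDivLoop num1 (pvNatRepr b) n (f + 1) n (dp - 1)
          (pvCountLoop (pvNatRepr b) 10
            (if pvLstrip0 (pvCanon r ++ ['0']) = [] then ['0'] else pvLstrip0 (pvCanon r ++ ['0'])) 0).1
          (quot ++ PySem.Int.toChars (pvCountLoop (pvNatRepr b) 10
            (if pvLstrip0 (pvCanon r ++ ['0']) = [] then ['0'] else pvLstrip0 (pvCanon r ++ ['0'])) 0).2) = _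
      rw [pvStep_rem (pvCanon r) r '0' (by constructor <;> decide) (Or.inl rfl)]
      have h0 : ('0' : Char).toNat - 48 = 0 := by decide
      rw [show 10 * r + (('0' : Char).toNat - 48) = 10 * r from by rw [h0]; omega]
      have hdivlt : 10 * r / b < 10 := by
        rw [Nat.div_lt_iff_lt_mul (by omega)]
        omega
      rw [pvCountLoop_spec b hb 10 (10 * r) 0 hdivlt]
      have htc : PySem.Int.toChars ((0 : Int) + ((10 * r / b : Nat) : Int))
          = [Nat.digitChar (10 * r / b)] := by
        rw [zero_add, pvToChars_natCast, pvCanon_small _ (by omega)]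
      rw [htc]
      rw [ih (dp - 1) (10 * r % b) (quot ++ [Nat.digitChar (10 * r / b)])
        (Nat.mod_lt _ (by omega)) (by omega)]
      have hfs : pvFracSpec b (f + 1) dp r
          = if dp > 0 ∧ r ≠ 0 then
              (Nat.digitChar (10 * r / b) :: (pvFracSpec b f (dp - 1) (10 * r % b)).1,
               (pvFracSpec b f (dp - 1) (10 * r % b)).2)
            else ([], r) := rfl
      rw [hfs, if_pos hcond]
      simp
    · show (if n < n ∨ (dp > 0 ∧ pvCanon r ≠ ['0']) then _ else _) = _
      rw [if_neg (by
        rintro (h | ⟨h1, h2⟩)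
        · exact lt_irrefl n h
        · exact hcond ⟨h1, fun he => h2 (by rw [he]; rfl)⟩)]
      show (quot, pvCanon r) = _
      have hfs : pvFracSpec b (f + 1) dp r
          = if dp > 0 ∧ r ≠ 0 then
              (Nat.digitChar (10 * r / b) :: (pvFracSpec b f (dp - 1) (10 * r % b)).1,
               (pvFracSpec b f (dp - 1) (10 * r % b)).2)
            else ([], r) := rfl
      rw [hfs, if_neg hcond]
      simp

theorem pvPhase2_B (b : Nat) (hb : 1 ≤ b) :
    ∀ (f : Nat) (dp : Int) (r : Nat) (ds : List (List Char)), r < b →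
      pvFracLoop (b : Int) f dp (r : Int) ds
        = (ds ++ (pvFracSpec b f dp r).1.map (fun c => [c]), ((pvFracSpec b f dp r).2 : Int)) := by
  intro f
  induction f with
  | zero =>
    intro dp r ds hr
    simp [pvFracLoop, pvFracSpec]
  | succ f ih =>
    intro dp r ds hr
    by_cases hcond : dp > 0 ∧ r ≠ 0
    · have hcond' : dp > 0 ∧ (r : Int) ≠ 0 := ⟨hcond.1, by exact_mod_cast hcond.2⟩
      show (if dp > 0 ∧ (r : Int) ≠ 0 then _ else _) = _
      rw [if_pos hcond']
      have e10 : (r : Int) * 10 = ((10 * r : Nat) : Int) := by push_cast; ring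
      have ed : PySem.Int.floordiv ((r : Int) * 10) (b : Int) = ((10 * r / b : Nat) : Int) := by
        rw [e10]; exact PySem.Int.floordiv_natCast _ _
      have em : PySem.Int.mod ((r : Int) * 10) (b : Int) = ((10 * r % b : Nat) : Int) := by
        rw [e10]; exact PySem.Int.mod_natCast _ _
      have htc : PySem.Int.toChars (PySem.Int.floordiv ((r : Int) * 10) (b : Int))
          = [Nat.digitChar (10 * r / b)] := by
        rw [ed, pvToChars_natCast, pvCanon_small _ (by
          have : 10 * r / b < 10 := by rw [Nat.div_lt_iff_lt_mul (by omega)]; omega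
          omega)]
      show pvFracLoop (b : Int) f (dp - 1) (PySem.Int.mod ((r : Int) * 10) (b : Int))
          (ds ++ [PySem.Int.toChars (PySem.Int.floordiv ((r : Int) * 10) (b : Int))]) = _
      rw [htc, em, ih (dp - 1) (10 * r % b) _ (Nat.mod_lt _ (by omega))]
      have hfs : pvFracSpec b (f + 1) dp r
          = if dp > 0 ∧ r ≠ 0 then
              (Nat.digitChar (10 * r / b) :: (pvFracSpec b f (dp - 1) (10 * r % b)).1,
               (pvFracSpec b f (dp - 1) (10 * r % b)).2)
            else ([], r) := rfl
      rw [hfs, if_pos hcond]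
      simp
    · have hcond' : ¬ (dp > 0 ∧ (r : Int) ≠ 0) := by
        intro hx
        exact hcond ⟨hx.1, by exact_mod_cast hx.2⟩
      show (if dp > 0 ∧ (r : Int) ≠ 0 then _ else _) = _
      rw [if_neg hcond']
      have hfs : pvFracSpec b (f + 1) dp r
          = if dp > 0 ∧ r ≠ 0 then
              (Nat.digitChar (10 * r / b) :: (pvFracSpec b f (dp - 1) (10 * r % b)).1,
               (pvFracSpec b f (dp - 1) (10 * r % b)).2)
            else ([], r) := rfl
      rw [hfs, if_neg hcond]
      simp

theorem pvPhase1_A (num1 : List Char) (b : Nat) (hb : 1 ≤ b) (n : Nat) (hn : n = num1.length) :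
    ∀ (ds : List Char) (i r : Nat) (rem quot : List Char) (rest : Nat) (dp : Int),
      i + ds.length = n → num1.drop i = ds → pvDig ds → r < b →
      (rem = pvCanon r ∨ (rem = [] ∧ r = 0 ∧ ds ≠ [])) →
      pvDivLoop num1 (pvNatRepr b) n (ds.length + rest) i dp rem quot
        = pvDivLoop num1 (pvNatRepr b) n rest n dp (pvCanon (pvIntSpec b ds r).2)
            (quot ++ (pvIntSpec b ds r).1) := by
  intro ds
  induction ds with
  | nil =>
    intro i r rem quot rest dp hi hdrop hdig hr hrem
    rcases hrem with rfl | ⟨_, _, hne⟩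
    · have hin : i = n := by simpa using hi
      rw [hin]
      simp [pvIntSpec]
    · exact absurd rfl hne
  | cons c cs ih =>
    intro i r rem quot rest dp hi hdrop hdig hr hrem
    have hin : i < n := by simp at hi; omega
    have hfuel : (c :: cs).length + rest = (cs.length + rest) + 1 := by simp; omega
    rw [hfuel]
    show (if i < n ∨ (dp > 0 ∧ rem ≠ ['0']) then _ else _) = _
    rw [if_pos (Or.inl hin), if_pos hin]
    have hget : (PySem.List.pyGet? num1 (i : Int)).getD ' ' = c := by
      rw [PySem.List.pyGet?_natCast]
      have h1 : num1[i]? = some c := by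
        rw [← List.head?_drop, hdrop]
        rfl
      rw [h1]
      rfl
    rw [hget]
    show pvDivLoop num1 (pvNatRepr b) n (cs.length + rest) (i + 1) dp
        (pvCountLoop (pvNatRepr b) 10
          (if pvLstrip0 (rem ++ [c]) = [] then ['0'] else pvLstrip0 (rem ++ [c])) 0).1
        (quot ++ PySem.Int.toChars (pvCountLoop (pvNatRepr b) 10
          (if pvLstrip0 (rem ++ [c]) = [] then ['0'] else pvLstrip0 (rem ++ [c])) 0).2) = _
    have hdc := hdig c (by simp)
    have hrem' : rem = pvCanon r ∨ (rem = [] ∧ r = 0) := by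
      rcases hrem with h | ⟨h1, h2, _⟩
      · exact Or.inl h
      · exact Or.inr ⟨h1, h2⟩
    rw [pvStep_rem rem r c hdc hrem']
    have hdle := pvDval_le c hdc
    have ht10 : 10 * r + (c.toNat - 48) < 10 * b := by omega
    have hdivlt : (10 * r + (c.toNat - 48)) / b < 10 := by
      rw [Nat.div_lt_iff_lt_mul (by omega)]
      omega
    rw [pvCountLoop_spec b hb 10 (10 * r + (c.toNat - 48)) 0 hdivlt]
    have htc : PySem.Int.toChars ((0 : Int) + (((10 * r + (c.toNat - 48)) / b : Nat) : Int))
        = [Nat.digitChar ((10 * r + (c.toNat - 48)) / b)] := by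
      rw [zero_add, pvToChars_natCast, pvCanon_small _ (by omega)]
    rw [htc]
    have hdrop' : num1.drop (i + 1) = cs := by
      have h1 := congrArg List.tail hdrop
      simpa [List.tail_drop] using h1
    have hdig' : pvDig cs := fun x hx => hdig x (by simp [hx])
    rw [ih (i + 1) ((10 * r + (c.toNat - 48)) % b) _ _ rest dp
      (by simp at hi ⊢; omega) hdrop' hdig' (Nat.mod_lt _ (by omega)) (Or.inl rfl)]
    have hint : pvIntSpec b (c :: cs) r
        = (Nat.digitChar ((10 * r + (c.toNat - 48)) / b)
             :: (pvIntSpec b cs ((10 * r + (c.toNat - 48)) % b)).1,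
           (pvIntSpec b cs ((10 * r + (c.toNat - 48)) % b)).2) := rfl
    rw [hint]
    simp

theorem pvIntSpec_divmod (b : Nat) (hb : 1 ≤ b) :
    ∀ (ds : List Char) (r : Nat), pvDig ds → r < b →
      pvIntSpec b ds r
        = (pvPad ds.length ((r * 10 ^ ds.length + pvVal ds) / b),
           (r * 10 ^ ds.length + pvVal ds) % b) := by
  intro ds
  induction ds with
  | nil =>
    intro r _ hr
    simp [pvIntSpec, pvPad, pvVal, Nat.mod_eq_of_lt hr]
  | cons c cs ih =>
    intro r hdig hr
    have hdc := hdig c (by simp)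
    have hdle := pvDval_le c hdc
    have hdig' : pvDig cs := fun x hx => hdig x (by simp [hx])
    have hvcs := pvVal_lt cs hdig'
    have hN : r * 10 ^ (c :: cs).length + pvVal (c :: cs)
        = b * (((10 * r + (c.toNat - 48)) / b) * 10 ^ cs.length)
          + (((10 * r + (c.toNat - 48)) % b) * 10 ^ cs.length + pvVal cs) := by
      rw [pvVal_cons]
      have hdm : b * ((10 * r + (c.toNat - 48)) / b) + (10 * r + (c.toNat - 48)) % b
          = 10 * r + (c.toNat - 48) := by
        rw [Nat.div_add_mod]
      calc r * 10 ^ (c :: cs).length + ((c.toNat - 48) * 10 ^ cs.length + pvVal cs)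
          = (10 * r + (c.toNat - 48)) * 10 ^ cs.length + pvVal cs := by
            simp [List.length_cons, pow_succ]
            ring
        _ = (b * ((10 * r + (c.toNat - 48)) / b) + (10 * r + (c.toNat - 48)) % b) * 10 ^ cs.length + pvVal cs := by
            rw [hdm]
        _ = b * (((10 * r + (c.toNat - 48)) / b) * 10 ^ cs.length)
              + (((10 * r + (c.toNat - 48)) % b) * 10 ^ cs.length + pvVal cs) := by ring
    have hN' : ((10 * r + (c.toNat - 48)) % b) * 10 ^ cs.length + pvVal cs < b * 10 ^ cs.length := by
      have h1 : (10 * r + (c.toNat - 48)) % b < b := Nat.mod_lt _ (by omega)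
      have h2 : ((10 * r + (c.toNat - 48)) % b) * 10 ^ cs.length ≤ (b - 1) * 10 ^ cs.length :=
        Nat.mul_le_mul_right _ (by omega)
      have h3 : (b - 1) * 10 ^ cs.length + 10 ^ cs.length = b * 10 ^ cs.length := by
        have : b - 1 + 1 = b := by omega
        calc (b - 1) * 10 ^ cs.length + 10 ^ cs.length = (b - 1 + 1) * 10 ^ cs.length := by ring
          _ = b * 10 ^ cs.length := by rw [this]
      omega
    have hdivN : (r * 10 ^ (c :: cs).length + pvVal (c :: cs)) / b
        = ((10 * r + (c.toNat - 48)) / b) * 10 ^ cs.length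
          + (((10 * r + (c.toNat - 48)) % b) * 10 ^ cs.length + pvVal cs) / b := by
      rw [hN, Nat.mul_add_div (by omega)]
    have hmodN : (r * 10 ^ (c :: cs).length + pvVal (c :: cs)) % b
        = (((10 * r + (c.toNat - 48)) % b) * 10 ^ cs.length + pvVal cs) % b := by
      rw [hN, Nat.mul_add_mod]
    have hrecdiv : (((10 * r + (c.toNat - 48)) % b) * 10 ^ cs.length + pvVal cs) / b < 10 ^ cs.length := by
      rw [Nat.div_lt_iff_lt_mul (by omega)]
      calc ((10 * r + (c.toNat - 48)) % b) * 10 ^ cs.length + pvVal cs < b * 10 ^ cs.length := hN'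
        _ ≤ 10 ^ cs.length * b := by ring_nf; exact le_refl _
    have hq9 : (10 * r + (c.toNat - 48)) / b < 10 := by
      rw [Nat.div_lt_iff_lt_mul (by omega)]
      omega
    have hpadspl : pvPad (c :: cs).length ((r * 10 ^ (c :: cs).length + pvVal (c :: cs)) / b)
        = Nat.digitChar ((10 * r + (c.toNat - 48)) / b)
            :: pvPad cs.length ((((10 * r + (c.toNat - 48)) % b) * 10 ^ cs.length + pvVal cs) / b) := by
      show pvPad (cs.length + 1) _ = _
      have hlt : (r * 10 ^ (c :: cs).length + pvVal (c :: cs)) / b < 10 ^ (cs.length + 1) := by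
        rw [Nat.div_lt_iff_lt_mul (by omega), hN]
        have e : 10 ^ (cs.length + 1) * b = 10 * (b * 10 ^ cs.length) := by rw [pow_succ]; ring
        have h1 : b * (((10 * r + (c.toNat - 48)) / b) * 10 ^ cs.length) ≤ 9 * (b * 10 ^ cs.length) := by
          have h2 : ((10 * r + (c.toNat - 48)) / b) ≤ 9 := by omega
          calc b * (((10 * r + (c.toNat - 48)) / b) * 10 ^ cs.length)
              = ((10 * r + (c.toNat - 48)) / b) * (b * 10 ^ cs.length) := by ring
            _ ≤ 9 * (b * 10 ^ cs.length) := Nat.mul_le_mul_right _ h2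
        rw [e]
        omega
      rw [pvPad_split cs.length _ hlt]
      congr 1
      · congr 1
        rw [hdivN, Nat.add_comm]
        rw [Nat.add_mul_div_right _ _ (pow_pos (by norm_num) cs.length)]
        rw [Nat.div_eq_of_lt hrecdiv]
        omega
      · congr 1
        rw [hdivN, Nat.add_comm, Nat.add_mul_mod_self_right]
        exact Nat.mod_eq_of_lt hrecdiv
    show (Nat.digitChar _ :: (pvIntSpec b cs _).1, (pvIntSpec b cs _).2) = _
    rw [ih _ hdig' (Nat.mod_lt _ (by omega)), hpadspl, hmodN]

/- ## B-side helpers -/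

theorem pvToInt_from (cs : List Char) (h : pvDig cs) : ∀ (a : Nat),
    cs.foldl (fun v c => 10 * v + ((c.toNat : Int) - 48)) (a : Int)
      = ((cs.foldl (fun v c => 10 * v + (c.toNat - 48)) a : Nat) : Int) := by
  induction cs with
  | nil => intro a; rfl
  | cons c cs ih =>
    intro a
    have hdc := h c (by simp)
    have hb48 := pvDigit_bounds c hdc
    have h1 : (10 : Int) * (a : Int) + ((c.toNat : Int) - 48) = ((10 * a + (c.toNat - 48) : Nat) : Int) := by
      push_cast
      omega
    show cs.foldl _ ((10 : Int) * (a : Int) + ((c.toNat : Int) - 48)) = _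
    rw [h1, ih (fun x hx => h x (by simp [hx]))]
    rfl

theorem pvToInt_eq (cs : List Char) (h : pvDig cs) : pvToInt cs = (pvVal cs : Int) := by
  have := pvToInt_from cs h 0
  simpa [pvToInt, pvVal] using this

theorem pvLstrip0_pad_prefix (n q : Nat) (hq : q < 10 ^ n) (t : List Char) :
    pvLstrip0 (pvPad n q ++ t) = pvLstrip0 (pvCanon q ++ t) := by
  rw [pvPad_eq n q hq, List.append_assoc, pvLstrip0_replicate]
  rcases Nat.eq_zero_or_pos q with rfl | hqp
  · rw [pvNatRepr_zero]
    have h1 : pvCanon 0 = ['0'] := rfl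
    rw [h1]
    have h2 : (['0'] : List Char) ++ t = List.replicate 1 '0' ++ t := rfl
    rw [h2, pvLstrip0_replicate]
    rfl
  · have h1 : pvCanon q = pvNatRepr q := by unfold pvCanon; rw [if_neg (by omega)]
    rw [h1]

theorem pvCmp_lt_of_len_lt (a b : List Char) (h : a.length < b.length) : pvCmp a b = -1 := by
  unfold pvCmp
  rw [if_neg (by omega), if_pos h]

-- ===== VERDICT (by name: the statement is the Claim_ definition above) =====
theorem divide_strings_spec : Claim_equal_divide_strings := by
  intro num1 num2 dp _hdom hpre
  unfold Spec_divide_strings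
  obtain ⟨h2, hcase⟩ := hpre
  unfold divide_strings divide_strings_alt
  rw [if_neg h2, if_neg h2]
  by_cases h1 : num1 = "0"
  · rw [if_pos h1, if_pos h1]
  rw [if_neg h1, if_neg h1]
  by_cases hcl : pvCmp num1.toList num2.toList < 0
  · show (if pvCmp num1.toList num2.toList < 0 then (("0" : String), num1) else _)
        = (if pvCmp num1.toList num2.toList < 0 then (("0" : String), num1) else _)
    rw [if_pos hcl, if_pos hcl]
  show (if pvCmp num1.toList num2.toList < 0 then (("0" : String), num1) else _)
      = (if pvCmp num1.toList num2.toList < 0 then (("0" : String), num1) else _)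
  rw [if_neg hcl, if_neg hcl]
  by_cases hce : pvCmp num1.toList num2.toList = 0
  · show (if pvCmp num1.toList num2.toList = 0 then (("1" : String), ("0" : String)) else _)
        = (if pvCmp num1.toList num2.toList = 0 then (("1" : String), ("0" : String)) else _)
    rw [if_pos hce, if_pos hce]
  show (if pvCmp num1.toList num2.toList = 0 then (("1" : String), ("0" : String)) else _)
      = (if pvCmp num1.toList num2.toList = 0 then (("1" : String), ("0" : String)) else _)
  rw [if_neg hce, if_neg hce]
  -- only the fully-digit case of Pre_ can reach this branch
  rcases hcase with h | h | h | h
  · exact absurd h h1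
  · exfalso
    apply hcl
    rw [pvCmp_lt_of_len_lt _ _ h]
    norm_num
  · exfalso
    have hnlt : ¬ num2.toList < num1.toList := by
      have h2' := h.2
      simp [PySem.Chars.strLt] at h2'
      exact not_lt.mpr h2'
    by_cases hs : num1.toList = num2.toList
    · apply hce
      unfold pvCmp
      rw [if_neg (by omega), if_neg (by omega), if_pos hs]
    · apply hcl
      unfold pvCmp
      rw [if_neg (by omega), if_neg (by omega), if_neg hs, if_neg hnlt]
      norm_num
  obtain ⟨hne1, hne2, hall1, hall2, hh2⟩ := h
  have hdig1 : ∀ c ∈ num1.toList, '0' ≤ c ∧ c ≤ '9' := by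
    intro c hc
    have hx := List.all_eq_true.mp hall1 c hc
    simpa using hx
  have hdig2 : ∀ c ∈ num2.toList, '0' ≤ c ∧ c ≤ '9' := by
    intro c hc
    have hx := List.all_eq_true.mp hall2 c hc
    simpa using hx
  have hb : 1 ≤ pvVal num2.toList := pvVal_pos num2.toList hdig2 hne2 hh2
  have hL2 : num2.toList = pvNatRepr (pvVal num2.toList) :=
    (pvRepr_roundtrip num2.toList hdig2 hne2 hh2).symm
  set L1 := num1.toList with hL1def
  set b := pvVal num2.toList with hbdef
  set V := pvVal L1 with hVdef
  set n := L1.length with hndef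
  set dpt := (if dp > 0 then dp.toNat else 0) with hdpt
  show (String.ofList (if pvLstrip0 (pvDivLoop L1 num2.toList n (n + dpt + 1) 0 dp [] []).1 = []
          then ['0'] else pvLstrip0 (pvDivLoop L1 num2.toList n (n + dpt + 1) 0 dp [] []).1),
        String.ofList (if pvLstrip0 (pvDivLoop L1 num2.toList n (n + dpt + 1) 0 dp [] []).2 = []
          then ['0'] else pvLstrip0 (pvDivLoop L1 num2.toList n (n + dpt + 1) 0 dp [] []).2))
      = (String.ofList (if pvLstrip0 (PySem.Int.toChars (PySem.Int.floordiv (pvToInt L1) (pvToInt num2.toList))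
              ++ (pvFracLoop (pvToInt num2.toList) dpt dp (PySem.Int.mod (pvToInt L1) (pvToInt num2.toList)) []).1.flatten) = []
          then ['0']
          else pvLstrip0 (PySem.Int.toChars (PySem.Int.floordiv (pvToInt L1) (pvToInt num2.toList))
              ++ (pvFracLoop (pvToInt num2.toList) dpt dp (PySem.Int.mod (pvToInt L1) (pvToInt num2.toList)) []).1.flatten)),
         PySem.Int.toStr (pvFracLoop (pvToInt num2.toList) dpt dp (PySem.Int.mod (pvToInt L1) (pvToInt num2.toList)) []).2)
  -- A side: phase 1 (the digits of num1), then phase 2 (the fractional digits)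
  have hfuel : n + dpt + 1 = L1.length + (dpt + 1) := by omega
  have hphase1 := pvPhase1_A L1 b hb n rfl L1 0 0 [] [] (dpt + 1) dp
    (by omega) (by simp) hdig1 (by omega) (Or.inr ⟨rfl, rfl, hne1⟩)
  have hIS : pvIntSpec b L1 0 = (pvPad n (V / b), V % b) := by
    rw [pvIntSpec_divmod b hb L1 0 hdig1 (by omega)]
    rw [hndef, hVdef]
    simp
  have hdple : dp ≤ ((dpt : Nat) : Int) := by rw [hdpt]; split <;> omega
  have hmodlt : V % b < b := Nat.mod_lt _ (by omega)
  have hmodlt' : (pvIntSpec b L1 0).2 < b := by rw [hIS]; exact hmodlt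
  have hphase2 := pvPhase2_A L1 b hb n dpt dp ((pvIntSpec b L1 0).2) ([] ++ (pvIntSpec b L1 0).1) hmodlt' hdple
  have hA : pvDivLoop L1 num2.toList n (n + dpt + 1) 0 dp [] []
      = (pvPad n (V / b) ++ (pvFracSpec b dpt dp (V % b)).1,
         pvCanon (pvFracSpec b dpt dp (V % b)).2) := by
    rw [hL2, hfuel, hphase1, hphase2, hIS]
    simp
  -- B side
  have hToInt1 : pvToInt L1 = (V : Int) := pvToInt_eq L1 hdig1
  have hToInt2 : pvToInt num2.toList = (b : Int) := pvToInt_eq num2.toList hdig2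
  have hq : PySem.Int.floordiv (pvToInt L1) (pvToInt num2.toList) = ((V / b : Nat) : Int) := by
    rw [hToInt1, hToInt2]; exact PySem.Int.floordiv_natCast _ _
  have hrm : PySem.Int.mod (pvToInt L1) (pvToInt num2.toList) = ((V % b : Nat) : Int) := by
    rw [hToInt1, hToInt2]; exact PySem.Int.mod_natCast _ _
  have hB := pvPhase2_B b hb dpt dp (V % b) [] hmodlt
  have hVlt : V / b < 10 ^ n :=
    lt_of_le_of_lt (Nat.div_le_self _ _) (pvVal_lt L1 hdig1)
  have hquot : pvLstrip0 (pvDivLoop L1 num2.toList n (n + dpt + 1) 0 dp [] []).1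
      = pvLstrip0 (PySem.Int.toChars (PySem.Int.floordiv (pvToInt L1) (pvToInt num2.toList))
          ++ (pvFracLoop (pvToInt num2.toList) dpt dp (PySem.Int.mod (pvToInt L1) (pvToInt num2.toList)) []).1.flatten) := by
    rw [hA, hq, hrm, hToInt2, hB]
    simp only [List.nil_append]
    rw [pvFlatten_singletons, pvToChars_natCast]
    exact pvLstrip0_pad_prefix n (V / b) hVlt _
  have hrem : (if pvLstrip0 (pvDivLoop L1 num2.toList n (n + dpt + 1) 0 dp [] []).2 = []
        then ['0'] else pvLstrip0 (pvDivLoop L1 num2.toList n (n + dpt + 1) 0 dp [] []).2)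
      = pvCanon (pvFracSpec b dpt dp (V % b)).2 := by
    rw [hA]
    exact pvLstrip0_canon_or _
  rw [hquot, hrem]
  congr 1
  rw [hrm, hToInt2, hB]
  show String.ofList (pvCanon (pvFracSpec b dpt dp (V % b)).2)
      = PySem.Int.toStr (((pvFracSpec b dpt dp (V % b)).2 : Nat) : Int)
  unfold PySem.Int.toStr
  rw [pvToChars_natCast]
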